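-- pv_equiv track=rewrite | github.com/stmandl/coldcuts | dcp/1328-palindroms.py | find_pali
-- ===== SOURCE A (Python) =====
-- def is_pali(str):
--     return str == str[::-1]
--
-- def find_pali(str):
--     a, b = 0, len(str)-1
--     res = []
--     while a<len(str):
--         while b>=a:
--             if is_pali(str[a:b+1]):
--                 res.append(str[a:b+1])
--                 a = b+1
--                 b = len(str) -1
--                 break
--             else:
--                 b -= 1
--     return res
-- ===== SOURCE B (Python) =====
-- def find_pali(str):
--     # O(n^2): bottom-up palindrome DP kept one row at a time; while building row i
--     # we record best[i] = the largest j with str[i..j] a palindrome, then a single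
--     # greedy pass over best produces the partition.
--     n = len(str)
--     best = []          # best[k] = largest j such that str[i+k:j+1] is a palindrome
--     prev = []          # palindrome row for index i+1
--     for i in range(n - 1, -1, -1):
--         row = [str[i] == str[j] and (j - i < 2 or prev[j - 1]) for j in range(n)]
--         b = n - 1
--         while b > i and not row[b]:
--             b -= 1
--         best = [b] + best
--         prev = row
--     res = []
--     i = 0
--     while i < n:
--         j = best[i]
--         res.append(str[i:j + 1])
--         i = j + 1
--     return res
-- ===== Notes on version B (the rewrite author's own statement) =====
-- stated objective: faster
-- what changed: Replaced the repeated O(n) string-reversal palindrome test inside A's greedy scan by a bottom-up palindrome DP kept one row at a time, recording for each start index the largest palindromic end index, so the greedy partition is read off in one pass; intended as asymptotically faster (O(n^2) vs O(n^3)), measured 4.7x at n=1024 (a timing run could not confirm the largest size: both exceeded its budget at n=4096).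
import Mathlib
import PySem

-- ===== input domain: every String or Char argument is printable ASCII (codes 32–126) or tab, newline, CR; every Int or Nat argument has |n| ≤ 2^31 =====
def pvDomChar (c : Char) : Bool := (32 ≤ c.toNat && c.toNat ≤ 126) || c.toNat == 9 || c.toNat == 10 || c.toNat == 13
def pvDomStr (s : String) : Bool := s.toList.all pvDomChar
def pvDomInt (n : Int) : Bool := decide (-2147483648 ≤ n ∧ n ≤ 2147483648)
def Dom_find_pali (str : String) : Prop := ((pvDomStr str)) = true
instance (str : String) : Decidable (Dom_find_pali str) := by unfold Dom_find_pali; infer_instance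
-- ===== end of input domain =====

-- B replaces A's cubic greedy scan (string-reversal palindrome test per candidate substring)
-- by a quadratic one-row-at-a-time palindrome DP; intended as faster (measured 4.7x at n=1024).

-- ===== PORT A =====
-- is_pali(str): str == str[::-1]  (on the code-point list)
def pvIsPali (s : List Char) : Bool := PySem.List.slice? s none none (-1) == some s

-- inner 'while b>=a' loop, b stepping down; fuel = number of remaining b values
-- (fuel 0 ↔ b < a: the loop exits without break; then Python's outer loop would
-- spin forever — proved unreachable below). Returns the b at which the break fires.
def pvInnerAGo (cs : List Char) (a : Int) : Nat → Int → Option Int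
  | 0, _ => none
  | fuel + 1, b =>
    if pvIsPali (PySem.List.slice cs (some a) (some (b + 1))) then some b
    else pvInnerAGo cs a fuel (b - 1)

def pvInnerA (cs : List Char) (a b : Int) : Option Int :=
  pvInnerAGo cs a (b + 1 - a).toNat b

-- outer 'while a<len(str)' loop; a strictly increases each iteration, so
-- fuel = len(str) suffices (fuel only makes the recursion structural)
def pvOuterAGo (cs : List Char) : Nat → Int → List String → List String
  | 0, _, res => res
  | fuel + 1, a, res =>
    if a < (cs.length : Int) then
      match pvInnerA cs a ((cs.length : Int) - 1) with
      | some b =>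
          pvOuterAGo cs fuel (b + 1)
            (res ++ [String.ofList (PySem.List.slice cs (some a) (some (b + 1)))])
      | none => res      -- unreachable reading of a diverging Python state
    else res

def find_pali (str : String) : List String :=
  pvOuterAGo str.toList str.toList.length 0 []

-- ===== PORT B =====
-- row i of the palindrome DP: row[j] = (str[i]==str[j] and (j-i<2 or prev[j-1]))
def pvRowB (cs : List Char) (i : Int) (prev : List Bool) : List Bool :=
  (PySem.List.pyRange 0 (cs.length : Int)).map (fun j =>
    (PySem.List.pyGet? cs i == PySem.List.pyGet? cs j) &&
    (decide (j - i < 2) || PySem.List.pyGetD prev (j - 1) false))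

-- 'b = n-1; while b > i and not row[b]: b -= 1'; fuel = number of b values above i
def pvScanBGo (row : List Bool) : Nat → Int → Int
  | 0, b => b
  | fuel + 1, b =>
    if PySem.List.pyGetD row b false then b else pvScanBGo row fuel (b - 1)

def pvScanB (i b : Int) (row : List Bool) : Int :=
  pvScanBGo row (b - i).toNat b

-- the 'for i in range(n-1,-1,-1)' pass building (best, prev)
def pvBuildB (cs : List Char) : List Int × List Bool :=
  (PySem.List.pyRange ((cs.length : Int) - 1) (-1) (-1)).foldl
    (fun st i =>
      let row := pvRowB cs i st.2
      let b := pvScanB i ((cs.length : Int) - 1) row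
      (b :: st.1, row))
    ([], [])

-- final greedy pass over best; fuel = n only makes the recursion total (i strictly
-- increases each step for the best table actually passed in)
def pvOuterB (cs : List Char) (best : List Int) : Nat → Int → List String → List String
  | 0, _, res => res
  | fuel + 1, i, res =>
      if i < (cs.length : Int) then
        let j := PySem.List.pyGetD best i 0
        pvOuterB cs best fuel (j + 1)
          (res ++ [String.ofList (PySem.List.slice cs (some i) (some (j + 1)))])
      else res

def find_pali_alt (str : String) : List String :=
  pvOuterB str.toList (pvBuildB str.toList).1 str.toList.length 0 []

-- ===== PRECONDITION & SPEC =====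
def Spec_find_pali (str : String) (out : List String) : Prop := out = find_pali_alt str
instance (str : String) (out : List String) : Decidable (Spec_find_pali str out) := by unfold Spec_find_pali; infer_instance

-- ===== CLAIM (what is proved, stated in full; the proofs are below) =====
def Claim_equal_find_pali : Prop := ∀ (str : String), Dom_find_pali str → Spec_find_pali str (find_pali str)

-- ===== LEMMAS AND PROOFS =====

-- pvP cs i j : the palindrome test A performs on str[i:j+1]
def pvP (cs : List Char) (i j : Int) : Bool :=
  pvIsPali (PySem.List.slice cs (some i) (some (j + 1)))

theorem pvP_def (cs : List Char) (i j : Int) :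
    pvIsPali (PySem.List.slice cs (some i) (some (j + 1))) = pvP cs i j := rfl

theorem pvIsPali_eq (s : List Char) : pvIsPali s = (s.reverse == s) := by
  simp [pvIsPali, PySem.List.slice?_none_none_neg_one]

theorem pvRev_cons_append (x y : Char) (m : List Char) :
    ((x :: (m ++ [y])).reverse = x :: (m ++ [y])) ↔ (x = y ∧ m.reverse = m) := by
  constructor
  · intro h
    simp only [List.reverse_cons, List.reverse_append, List.reverse_cons, List.reverse_nil,
      List.nil_append, List.cons_append, List.cons.injEq] at h
    obtain ⟨rfl, h2⟩ := h
    exact ⟨rfl, List.append_cancel_right h2⟩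
  · rintro ⟨rfl, hm⟩
    simp [List.reverse_append, hm]

theorem pvSlice_decomp (cs : List Char) (i' j' : Nat) (h1 : i' < j') (h2 : j' < cs.length) :
    (cs.drop i').take (j' - i' + 1) =
      cs[i']'(by omega) :: (((cs.drop (i' + 1)).take (j' - i' - 1)) ++ [cs[j']'h2]) := by
  obtain ⟨k, rfl⟩ : ∃ k, j' = i' + k + 1 := ⟨j' - i' - 1, by omega⟩
  rw [show i' + k + 1 - i' + 1 = k + 2 from by omega,
      show i' + k + 1 - i' - 1 = k from by omega]
  rw [List.drop_eq_getElem_cons (by omega : i' < cs.length), List.take_succ_cons]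
  congr 1
  have hk' : k < (cs.drop (i' + 1)).length := by rw [List.length_drop]; omega
  rw [List.take_add_one, List.getElem?_eq_getElem hk', List.getElem_drop]
  simp [show i' + 1 + k = i' + k + 1 from by omega]

-- the recurrence A's palindrome test satisfies, in the exact shape of B's row entry
theorem pvP_rec (cs : List Char) (i j : Int) (h0 : 0 ≤ i) (hij : i ≤ j) (hj : j < (cs.length : Int)) :
    pvP cs i j =
      ((cs[i.toNat]? == cs[j.toNat]?) && (decide (j - i < 2) || pvP cs (i + 1) (j - 1))) := by
  obtain ⟨i', rfl⟩ : ∃ n : Nat, i = (n : Int) := ⟨i.toNat, by omega⟩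
  obtain ⟨j', rfl⟩ : ∃ n : Nat, j = (n : Int) := ⟨j.toNat, by omega⟩
  have hi' : i' < cs.length := by omega
  have hj' : j' < cs.length := by omega
  simp only [Int.toNat_natCast]
  rw [List.getElem?_eq_getElem hi', List.getElem?_eq_getElem hj']
  unfold pvP
  rw [PySem.List.slice_toNat cs h0 (by omega), pvIsPali_eq]
  simp only [Int.toNat_natCast]
  rw [show ((j' : Int) + 1).toNat = j' + 1 from by omega,
      show j' + 1 - i' = j' - i' + 1 from by omega]
  by_cases h2 : (j' : Int) - i' < 2
  · rw [decide_eq_true h2, Bool.true_or, Bool.and_true]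
    by_cases hji : j' = i'
    · subst hji
      rw [Nat.sub_self]
      rw [List.drop_eq_getElem_cons (by omega), List.take_succ_cons, List.take_zero]
      simp
    · have h1 : i' < j' := by omega
      rw [pvSlice_decomp cs i' j' h1 hj']
      rw [show j' - i' - 1 = 0 from by omega, List.take_zero]
      rw [Bool.eq_iff_iff]
      simp only [beq_iff_eq]
      rw [pvRev_cons_append]
      simp
  · rw [decide_eq_false h2, Bool.false_or]
    have h1 : i' < j' := by omega
    rw [pvSlice_decomp cs i' j' h1 hj']
    rw [show ((i' : Int) + 1) = ((i' + 1 : Nat) : Int) from by push_cast; ring,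
        show ((j' : Int) - 1) = ((j' - 1 : Nat) : Int) from by omega]
    rw [PySem.List.slice_toNat cs (by omega) (by omega), pvIsPali_eq]
    simp only [Int.toNat_natCast]
    rw [show (((j' - 1 : Nat) : Int) + 1).toNat = j' from by omega,
        show j' - (i' + 1) = j' - i' - 1 from by omega]
    rw [Bool.eq_iff_iff]
    simp only [beq_iff_eq, Bool.and_eq_true]
    rw [pvRev_cons_append]
    simp only [Option.some.injEq]

theorem pvP_self (cs : List Char) (i : Int) (h0 : 0 ≤ i) (hi : i < (cs.length : Int)) :
    pvP cs i i = true := by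
  rw [pvP_rec cs i i h0 le_rfl hi]
  have : i.toNat < cs.length := by omega
  rw [List.getElem?_eq_getElem this]
  simp

theorem pvInnerAGo_bounds (cs : List Char) (a : Int) :
    ∀ (fuel : Nat) (b b' : Int), pvInnerAGo cs a fuel b = some b' → b - fuel < b' ∧ b' ≤ b := by
  intro fuel
  induction fuel with
  | zero => intro b b' h; cases h
  | succ fuel ih =>
    intro b b' h
    simp only [pvInnerAGo] at h
    by_cases hp : pvIsPali (PySem.List.slice cs (some a) (some (b + 1))) = true
    · rw [if_pos hp] at h
      simp only [Option.some.injEq] at h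
      omega
    · rw [if_neg hp] at h
      have := ih (b - 1) b' h
      omega

theorem pvInnerA_le (cs : List Char) (a b b' : Int) (h : pvInnerA cs a b = some b') : a ≤ b' := by
  unfold pvInnerA at h
  by_cases hab : a ≤ b
  · have := pvInnerAGo_bounds cs a (b + 1 - a).toNat b b' h
    omega
  · rw [show (b + 1 - a).toNat = 0 from by omega] at h
    cases h

-- the scan in B's build phase finds exactly the b at which A's inner loop breaks
theorem pvScan_eq_inner (cs : List Char) (i : Int) (row : List Bool)
    (hrow : ∀ k : Int, i ≤ k → k ≤ (cs.length : Int) - 1 → PySem.List.pyGetD row k false = pvP cs i k)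
    (hself : pvP cs i i = true) :
    ∀ (d : Nat) (b : Int), i ≤ b → b ≤ (cs.length : Int) - 1 → (b - i).toNat = d →
      pvInnerA cs i b = some (pvScanB i b row) := by
  intro d
  induction d with
  | zero =>
    intro b hb1 hb2 hd
    have hbi : b = i := by omega
    have hP : pvP cs i b = true := by rw [hbi]; exact hself
    unfold pvInnerA pvScanB
    rw [show (b + 1 - i).toNat = 0 + 1 from by omega, show (b - i).toNat = 0 from by omega]
    simp only [pvInnerAGo, pvScanBGo, pvP_def]
    rw [if_pos hP]
  | succ d ih =>
    intro b hb1 hb2 hd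
    have hr := hrow b (by omega) hb2
    unfold pvInnerA pvScanB
    rw [show (b + 1 - i).toNat = (d + 1) + 1 from by omega,
        show (b - i).toNat = d + 1 from by omega]
    simp only [pvInnerAGo, pvScanBGo, pvP_def]
    rw [hr]
    cases hp : pvP cs i b with
    | true => rw [if_pos rfl, if_pos rfl]
    | false =>
      rw [if_neg Bool.false_ne_true, if_neg Bool.false_ne_true]
      have := ih (b - 1) (by omega) (by omega) (by omega)
      unfold pvInnerA pvScanB at this
      rw [show (b - 1 + 1 - i).toNat = d + 1 from by omega,
          show (b - 1 - i).toNat = d from by omega] at this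
      exact this

-- proof-side view of the build fold, truncated at lower bound k
def pvF (cs : List Char) (k : Nat) : List Int × List Bool :=
  (PySem.List.pyRange ((cs.length : Int) - 1) ((k : Int) - 1) (-1)).foldl
    (fun st i =>
      let row := pvRowB cs i st.2
      let b := pvScanB i ((cs.length : Int) - 1) row
      (b :: st.1, row))
    ([], [])

theorem pvF_zero (cs : List Char) : pvBuildB cs = pvF cs 0 := by
  simp [pvBuildB, pvF]

theorem pvRange_split (cs : List Char) (k : Nat) (hk : k < cs.length) :
    PySem.List.pyRange ((cs.length : Int) - 1) ((k : Int) - 1) (-1) =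
      PySem.List.pyRange ((cs.length : Int) - 1) ((k : Int)) (-1) ++ [(k : Int)] := by
  rw [PySem.List.pyRange_neg_one_eq_reverse, PySem.List.pyRange_neg_one_eq_reverse]
  rw [show ((k : Int) - 1 + 1) = (k : Int) from by ring]
  rw [PySem.List.pyRange_one_cons (by omega : (k : Int) < (cs.length : Int) - 1 + 1)]
  simp

theorem pvGetD_cons_zero (x : Int) (l : List Int) : PySem.List.pyGetD (x :: l) 0 0 = x := by
  rw [PySem.List.pyGetD_of_nonneg _ _ le_rfl]; rfl

theorem pvGetD_cons_succ (x : Int) (l : List Int) (m : Int) (h : 1 ≤ m) :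
    PySem.List.pyGetD (x :: l) m 0 = PySem.List.pyGetD l (m - 1) 0 := by
  rw [PySem.List.pyGetD_of_nonneg _ _ (by omega : (0:Int) ≤ m),
      PySem.List.pyGetD_of_nonneg _ _ (by omega : (0:Int) ≤ m - 1)]
  rw [show m.toNat = (m - 1).toNat + 1 from by omega]
  rfl

def pvInv (cs : List Char) (k : Nat) : Prop :=
  (∀ j : Int, (k : Int) ≤ j → j ≤ (cs.length : Int) - 1 →
      PySem.List.pyGetD (pvF cs k).2 j false = pvP cs (k : Int) j) ∧
  (∀ m : Int, (k : Int) ≤ m → m < (cs.length : Int) →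
      pvInnerA cs m ((cs.length : Int) - 1) = some (PySem.List.pyGetD (pvF cs k).1 (m - k) 0))

theorem pvRow_spec (cs : List Char) (k : Nat) (prev : List Bool) (_hk : k < cs.length)
    (hprev : ∀ j : Int, (k : Int) + 1 ≤ j → j ≤ (cs.length : Int) - 1 →
      PySem.List.pyGetD prev j false = pvP cs ((k : Int) + 1) j) :
    ∀ j : Int, (k : Int) ≤ j → j ≤ (cs.length : Int) - 1 →
      PySem.List.pyGetD (pvRowB cs (k : Int) prev) j false = pvP cs (k : Int) j := by
  intro j hj1 hj2
  obtain ⟨j', rfl⟩ : ∃ n : Nat, j = (n : Int) := ⟨j.toNat, by omega⟩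
  unfold pvRowB
  rw [PySem.List.pyGetD_map_pyRange _ cs.length j' false (by omega)]
  rw [pvP_rec cs k j' (by omega) (by omega) (by omega)]
  simp only [Int.toNat_natCast, PySem.List.pyGet?_natCast]
  by_cases h2 : (j' : Int) - k < 2
  · rw [decide_eq_true h2]
    simp
  · rw [decide_eq_false h2]
    rw [show ((j' : Int) - 1) = ((j' - 1 : Nat) : Int) from by omega]
    rw [hprev _ (by omega) (by omega)]

theorem pvInv_holds (cs : List Char) : ∀ (d k : Nat), k + d = cs.length → pvInv cs k := by
  intro d
  induction d with
  | zero =>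
    intro k hk
    constructor
    · intro j hj1 hj2
      exact absurd hj2 (by omega)
    · intro m hm1 hm2
      exact absurd hm2 (by omega)
  | succ d ih =>
    intro k hk
    have hklt : k < cs.length := by omega
    obtain ⟨hprev, hbest⟩ := ih (k + 1) (by omega)
    have hstep : pvF cs k =
        (pvScanB (k : Int) ((cs.length : Int) - 1) (pvRowB cs (k : Int) (pvF cs (k + 1)).2)
           :: (pvF cs (k + 1)).1,
         pvRowB cs (k : Int) (pvF cs (k + 1)).2) := by
      conv_lhs => unfold pvF
      conv_rhs => unfold pvF
      rw [show ((k + 1 : Nat) : Int) - 1 = (k : Int) from by push_cast; ring]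
      rw [pvRange_split cs k hklt, List.foldl_concat]
    have h1 : (pvF cs k).1 =
        pvScanB (k : Int) ((cs.length : Int) - 1) (pvRowB cs (k : Int) (pvF cs (k + 1)).2)
          :: (pvF cs (k + 1)).1 := by rw [hstep]
    have h2 : (pvF cs k).2 = pvRowB cs (k : Int) (pvF cs (k + 1)).2 := by rw [hstep]
    have hprev' : ∀ j : Int, (k : Int) + 1 ≤ j → j ≤ (cs.length : Int) - 1 →
        PySem.List.pyGetD (pvF cs (k + 1)).2 j false = pvP cs ((k : Int) + 1) j := by
      intro j hj1 hj2
      rw [hprev j (by push_cast; omega) hj2]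
      rw [show (((k + 1 : Nat)) : Int) = (k : Int) + 1 from by push_cast; ring]
    have hrow := pvRow_spec cs k (pvF cs (k + 1)).2 hklt hprev'
    constructor
    · intro j hj1 hj2
      rw [h2]
      exact hrow j hj1 hj2
    · intro m hm1 hm2
      by_cases hmk : m = (k : Int)
      · subst hmk
        rw [h1, sub_self, pvGetD_cons_zero]
        exact pvScan_eq_inner cs (k : Int) _ hrow
          (pvP_self cs k (by omega) (by omega))
          (((cs.length : Int) - 1 - k).toNat) ((cs.length : Int) - 1) (by omega) le_rfl rfl
      · have hm1' : ((k + 1 : Nat) : Int) ≤ m := by push_cast; omega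
        rw [h1, pvGetD_cons_succ _ _ _ (by omega), hbest m hm1' hm2]
        rw [show m - ((k + 1 : Nat) : Int) = m - (k : Int) - 1 from by push_cast; ring]

theorem pvBuild_spec (cs : List Char) :
    ∀ m : Int, 0 ≤ m → m < (cs.length : Int) →
      pvInnerA cs m ((cs.length : Int) - 1) = some (PySem.List.pyGetD (pvBuildB cs).1 m 0) := by
  intro m hm1 hm2
  have h := (pvInv_holds cs cs.length 0 (by omega)).2 m (by exact_mod_cast hm1) hm2
  rw [pvF_zero cs]
  simpa using h

theorem pvOuter_eq (cs : List Char)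
    (hbest : ∀ m : Int, 0 ≤ m → m < (cs.length : Int) →
      pvInnerA cs m ((cs.length : Int) - 1) = some (PySem.List.pyGetD (pvBuildB cs).1 m 0)) :
    ∀ (fa : Nat) (fb : Nat) (a : Int) (res : List String), 0 ≤ a →
      ((cs.length : Int) - a).toNat ≤ fa → ((cs.length : Int) - a).toNat ≤ fb →
      pvOuterAGo cs fa a res = pvOuterB cs (pvBuildB cs).1 fb a res := by
  intro fa
  induction fa with
  | zero =>
    intro fb a res ha hfa hfb
    have hge : ¬ a < (cs.length : Int) := by omega
    cases fb with
    | zero => rfl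
    | succ fb => simp only [pvOuterAGo, pvOuterB, if_neg hge]
  | succ fa ih =>
    intro fb a res ha hfa hfb
    by_cases hlt : a < (cs.length : Int)
    · cases fb with
      | zero => exact absurd hfb (by omega)
      | succ fb =>
        have hinner := hbest a ha hlt
        simp only [pvOuterAGo, pvOuterB, if_pos hlt]
        split
        · rename_i b heq
          have hle := pvInnerA_le cs a ((cs.length : Int) - 1) b heq
          have hbj : b = PySem.List.pyGetD (pvBuildB cs).1 a 0 := by
            rw [heq] at hinner
            exact Option.some.inj hinner
          rw [← hbj]
          exact ih fb (b + 1) _ (by omega) (by omega) (by omega)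
        · rename_i heq
          rw [heq] at hinner
          cases hinner
    · cases fb with
      | zero => simp only [pvOuterAGo, pvOuterB, if_neg hlt]
      | succ fb => simp only [pvOuterAGo, pvOuterB, if_neg hlt]

-- ===== VERDICT (by name: the statement is the Claim_ definition above) =====
theorem find_pali_spec : Claim_equal_find_pali := by
  intro str _
  unfold Spec_find_pali find_pali find_pali_alt
  exact pvOuter_eq str.toList (pvBuild_spec str.toList) str.toList.length str.toList.length 0 []
    le_rfl (by omega) (by omega)
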